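-- pv_equiv track=rewrite | github.com/sdeep27/spaceshift | src/spaceshift/cli.py | _build_md_tree
-- ===== SOURCE A (Python) =====
-- def _build_md_tree(nodes, root_prompt, reverse=False):
--     """Build indented dash lines from flat node list using parent references."""
--     children_of = {}
--     for node in nodes:
--         parent = node.get("parent", root_prompt)
--         children_of.setdefault(parent, []).append(node)
--
--     lines = []
--
--     def _recurse(parent_prompt, indent=0):
--         for child in children_of.get(parent_prompt, []):
--             prefix = "  " * indent + "- "
--             lines.append(f"{prefix}{child['prompt']}")
--             _recurse(child["prompt"], indent + 1)
--
--     if reverse: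
--         top_level = children_of.get(root_prompt, [])
--         all_groups = []
--         for top_node in top_level:
--             group_lines = []
--             group_lines.append(f"- {top_node['prompt']}")
--             def _collect(parent_prompt, indent=1):
--                 for child in children_of.get(parent_prompt, []):
--                     group_lines.append(f"{'  ' * indent}- {child['prompt']}")
--                     _collect(child["prompt"], indent + 1)
--             _collect(top_node["prompt"])
--             all_groups.append(group_lines)
--
--         for group in reversed(all_groups):
--             lines.extend(group)
--     else:
--         _recurse(root_prompt)
--
--     return lines
-- ===== SOURCE B (Python) =====
-- def _build_md_tree(nodes, root_prompt, reverse=False):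
--     """One iterative stack walk for both modes: seeding order of the top-level
--     frames alone decides normal vs reversed group order (no recursion, no
--     per-group collection)."""
--     children_of = {}
--     for node in nodes:
--         children_of.setdefault(node.get("parent", root_prompt), []).append(node)
--
--     top = children_of.get(root_prompt, [])
--     # LIFO: to pop siblings in order, seed reversed; seeding in order pops the
--     # last top-level subtree first, which is exactly reverse mode.
--     stack = [(n, 0) for n in (top if reverse else reversed(top))]
--     lines = []
--     while stack:
--         node, indent = stack.pop()
--         lines.append("  " * indent + "- " + node["prompt"])
--         stack.extend((c, indent + 1)
--                      for c in reversed(children_of.get(node["prompt"], [])))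
--     return lines
-- ===== Notes on version B (the rewrite author's own statement) =====
-- stated objective: simpler
-- what changed: Replaced A's recursion (a shared-accumulator _recurse plus a duplicated _collect that gathers per-group line lists for reverse mode) by one iterative explicit-stack loop over (node, indent) frames; the LIFO seeding order of the top-level frames alone yields normal vs reversed group order, so reverse mode needs no group collection or second pass at all.
import Mathlib
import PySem

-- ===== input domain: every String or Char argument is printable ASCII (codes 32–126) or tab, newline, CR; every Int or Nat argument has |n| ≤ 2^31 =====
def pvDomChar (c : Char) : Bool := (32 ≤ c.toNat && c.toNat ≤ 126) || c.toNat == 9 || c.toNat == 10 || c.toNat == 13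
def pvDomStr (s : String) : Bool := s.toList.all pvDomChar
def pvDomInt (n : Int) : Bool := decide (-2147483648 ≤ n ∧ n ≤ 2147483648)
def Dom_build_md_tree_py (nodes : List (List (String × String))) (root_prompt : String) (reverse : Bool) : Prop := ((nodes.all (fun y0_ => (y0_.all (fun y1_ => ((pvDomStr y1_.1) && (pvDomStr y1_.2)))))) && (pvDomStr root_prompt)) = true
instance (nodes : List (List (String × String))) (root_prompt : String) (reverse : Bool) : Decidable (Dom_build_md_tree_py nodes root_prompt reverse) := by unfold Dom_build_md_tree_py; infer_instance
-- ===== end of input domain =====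

-- B replaces A's recursive accumulator walk (with a separate per-group collector duplicated for
-- reverse mode) by ONE iterative explicit-stack loop; the seeding order of the top-level frames
-- alone produces normal vs reversed group order, so no groups are ever collected (objective: simpler).

-- ===== PORT A =====
-- shared accessors: node.get("parent", root_prompt) and node["prompt"]
-- (node["prompt"] is total here with default ""; Pre_ excludes nodes without a "prompt" key, where Python raises KeyError)
def pvParent (root : String) (n : List (String × String)) : String :=
  PySem.Dict.getD (PySem.Dict.mk n) "parent" root

def pvPrompt (n : List (String × String)) : String :=
  PySem.Dict.getD (PySem.Dict.mk n) "prompt" ""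

-- "  " * indent (hand port of str*Nat; exact for the Nat indents used here)
def pvIndent : Nat → String
  | 0 => ""
  | k+1 => pvIndent k ++ "  "

-- children_of built by the first loop (identical in both Pythons):
-- setdefault(parent, []).append(node) = modify parent [] (· ++ [node])
def pvChildrenDict (nodes : List (List (String × String))) (root : String) :
    PySem.Dict String (List (List (String × String))) :=
  nodes.foldl (fun d n => d.modify (pvParent root n) [] (fun l => l ++ [n])) PySem.Dict.empty

-- _recurse / _collect (textually the same loop in A, appending to the enclosing list: the accumulator);
-- fuel is a totality guard only (recursion depth; Python recurses unboundedly and Pre_ excludes cycles)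
def pvRecurse (ch : PySem.Dict String (List (List (String × String)))) :
    Nat → String → Nat → List String → List String
  | 0, _, _, lines => lines
  | fuel+1, p, indent, lines =>
      (PySem.Dict.getD ch p []).foldl
        (fun ls c => pvRecurse ch fuel (pvPrompt c) (indent + 1)
                       (ls ++ [pvIndent indent ++ "- " ++ pvPrompt c]))
        lines

def build_md_tree_py (nodes : List (List (String × String))) (root_prompt : String) (reverse : Bool) : List String :=
  let children_of := pvChildrenDict nodes root_prompt
  if reverse then
    let top_level := PySem.Dict.getD children_of root_prompt []
    let all_groups := top_level.foldl
      (fun gs t => gs ++ [pvRecurse children_of (nodes.length + 1) (pvPrompt t) 1 ["- " ++ pvPrompt t]]) []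
    (all_groups.reverse).foldl (fun ls g => ls ++ g) []
  else
    pvRecurse children_of (nodes.length + 2) root_prompt 0 []

-- ===== PORT B =====
-- total length of the stored child lists: the bound used by pvLoop's termination measure
def pvValSum (ch : PySem.Dict String (List (List (String × String)))) : Nat :=
  (ch.values.map List.length).sum

-- single-lookup bound used by pvLoop's termination measure (cited in the decreasing proof)
theorem get?_len_le (l : List (String × List (List (String × String)))) (p : String)
    (v : List (List (String × String))) (h : (PySem.Dict.mk l).get? p = some v) :
    v.length ≤ ((PySem.Dict.mk l).values.map List.length).sum := by
  induction l with
  | nil => simp [PySem.Dict.get?] at h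
  | cons kv rest ih =>
      obtain ⟨k, w⟩ := kv
      rw [PySem.Dict.get?_mk_cons] at h
      simp only [PySem.Dict.values_mk, List.map_cons, List.sum_cons]
      by_cases hk : k == p
      · simp only [hk, if_pos, Option.some.injEq] at h
        subst h; omega
      · simp only [hk, Bool.false_eq_true, if_false] at h
        have := ih h
        simp only [PySem.Dict.values_mk] at this
        omega

theorem getD_len_le (ch : PySem.Dict String (List (List (String × String)))) (p : String) :
    (PySem.Dict.getD ch p []).length ≤ pvValSum ch := by
  cases ch with
  | mk l =>
      unfold pvValSum
      cases hg : (PySem.Dict.mk l).get? p with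
      | none => simp [PySem.Dict.getD, hg]
      | some v =>
          have := get?_len_le l p v hg
          simpa [PySem.Dict.getD, hg] using this

-- the while loop: an explicit stack of (node, indent, fuel) frames; head of the list is the stack
-- top, so Python's pushes of reversed(children) onto the list end appear here as prepending the
-- children in order.  The per-frame fuel is a totality guard only (Python loops unboundedly on a
-- cycle and Pre_ excludes cycles); termination by a weighted stack measure.
def pvLoop (ch : PySem.Dict String (List (List (String × String)))) :
    List ((List (String × String)) × Nat × Nat) → List String → List String
  | [], lines => lines
  | (c, ind, 0) :: rest, lines =>
      pvLoop ch rest (lines ++ [pvIndent ind ++ "- " ++ pvPrompt c])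
  | (c, ind, f+1) :: rest, lines =>
      pvLoop ch (((PySem.Dict.getD ch (pvPrompt c) []).map (fun d => (d, ind + 1, f))) ++ rest)
        (lines ++ [pvIndent ind ++ "- " ++ pvPrompt c])
termination_by st _ => (st.map (fun fr => (pvValSum ch + 1) ^ fr.2.2)).sum
decreasing_by
  · simp
  · simp only [List.map_append, List.map_map, List.sum_append, List.map_cons, List.sum_cons,
      Nat.succ_eq_add_one]
    have hlen := getD_len_le ch (pvPrompt c)
    have hc : ((fun fr : (List (String × String)) × Nat × Nat => (pvValSum ch + 1) ^ fr.2.2) ∘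
        (fun d : List (String × String) => (d, ind + 1, f))) = fun _ => (pvValSum ch + 1) ^ f := rfl
    rw [hc, List.map_const', List.sum_replicate, smul_eq_mul]
    have h1 : (PySem.Dict.getD ch (pvPrompt c) []).length * (pvValSum ch + 1) ^ f
        < (pvValSum ch + 1) ^ (f + 1) := by
      have hp : 0 < (pvValSum ch + 1) ^ f := Nat.pow_pos (Nat.succ_pos _)
      calc (PySem.Dict.getD ch (pvPrompt c) []).length * (pvValSum ch + 1) ^ f
          ≤ pvValSum ch * (pvValSum ch + 1) ^ f := Nat.mul_le_mul_right _ hlen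
        _ < (pvValSum ch + 1) * (pvValSum ch + 1) ^ f :=
            Nat.mul_lt_mul_of_lt_of_le (Nat.lt_succ_self _) (Nat.le_refl _) hp
        _ = (pvValSum ch + 1) ^ (f + 1) := by rw [Nat.pow_succ]; ring
    omega

def build_md_tree_py_alt (nodes : List (List (String × String))) (root_prompt : String) (reverse : Bool) : List String :=
  let children_of := pvChildrenDict nodes root_prompt
  let top := PySem.Dict.getD children_of root_prompt []
  -- Python's '[(n, 0) for n in (top if reverse else reversed(top))]' with the list END as stack
  -- top; head-as-top here, so the seeding order flips
  pvLoop children_of ((if reverse then top.reverse else top).map (fun n => (n, 0, nodes.length + 1))) []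

-- ===== PRECONDITION & SPEC =====
-- successors of a prompt set in the parent→prompt edge graph of the input
def pvSuccs (nodes : List (List (String × String))) (root : String) (S : List String) : List String :=
  (nodes.filter (fun n => S.contains (pvParent root n))).map pvPrompt

-- bounded transitive closure of that graph (nodes.length steps reach the fixpoint)
def pvReach (nodes : List (List (String × String))) (root : String) : Nat → List String → List String
  | 0, S => S
  | k+1, S => pvReach nodes root k (S ++ (pvSuccs nodes root S).filter (fun q => !(S.contains q)))

-- prompts reachable from root_prompt in that graph (root included)
def pvReachable (nodes : List (List (String × String))) (root : String) : List String :=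
  pvReach nodes root nodes.length [root]

-- Pre_ excludes exactly the inputs on which the Python raises: a node whose parent is reachable
-- from root_prompt but which has no "prompt" key (KeyError when visited), and a cycle of the
-- parent→prompt edge graph reachable from root_prompt (unbounded recursion). Both ports are
-- total and are proved equal on all inputs, so the proof itself does not consume Pre_; Pre_ only
-- delimits the inputs on which the ports model the Python.
def Pre_build_md_tree_py (nodes : List (List (String × String))) (root_prompt : String) (reverse : Bool) : Prop :=
  (∀ n ∈ nodes, (pvReachable nodes root_prompt).contains (pvParent root_prompt n) = true →
     ((PySem.Dict.mk n).get? "prompt").isSome) ∧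
  (∀ n ∈ nodes, (pvReachable nodes root_prompt).contains (pvPrompt n) = true →
     (pvReach nodes root_prompt nodes.length (pvSuccs nodes root_prompt [pvPrompt n])).contains (pvPrompt n) = false)
instance (nodes : List (List (String × String))) (root_prompt : String) (reverse : Bool) : Decidable (Pre_build_md_tree_py nodes root_prompt reverse) := by unfold Pre_build_md_tree_py; infer_instance

def pvWitness_build_md_tree_py : (List (List (String × String))) × String × Bool :=
  ([[("prompt", "a")], [("prompt", "b"), ("parent", "a")]], "r", false)

def Spec_build_md_tree_py (nodes : List (List (String × String))) (root_prompt : String) (reverse : Bool) (out : List String) : Prop := out = build_md_tree_py_alt nodes root_prompt reverse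
instance (nodes : List (List (String × String))) (root_prompt : String) (reverse : Bool) (out : List String) : Decidable (Spec_build_md_tree_py nodes root_prompt reverse out) := by unfold Spec_build_md_tree_py; infer_instance

-- ===== CLAIM (what is proved, stated in full; the proofs are below) =====
def Claim_equal_build_md_tree_py : Prop := ∀ (nodes : List (List (String × String))) (root_prompt : String) (reverse : Bool), Dom_build_md_tree_py nodes root_prompt reverse → Pre_build_md_tree_py nodes root_prompt reverse → Spec_build_md_tree_py nodes root_prompt reverse (build_md_tree_py nodes root_prompt reverse)

-- ===== LEMMAS AND PROOFS =====

-- the fuelled subtree expansion both ports compute (proof-side characterisation)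
def pvSub (ch : PySem.Dict String (List (List (String × String)))) :
    Nat → List (String × String) → Nat → List String
  | 0, c, i => [pvIndent i ++ "- " ++ pvPrompt c]
  | f+1, c, i =>
      (pvIndent i ++ "- " ++ pvPrompt c)
        :: (PySem.Dict.getD ch (pvPrompt c) []).flatMap (fun d => pvSub ch f d (i + 1))

-- one-step unfoldings of pvRecurse (rw-friendly)
theorem pvRecurse_zero (ch : PySem.Dict String (List (List (String × String)))) (p : String) (i : Nat) (lines : List String) :
    pvRecurse ch 0 p i lines = lines := rfl

theorem pvRecurse_succ (ch : PySem.Dict String (List (List (String × String)))) (fuel : Nat) (p : String) (i : Nat) (lines : List String) :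
    pvRecurse ch (fuel + 1) p i lines
      = (PySem.Dict.getD ch p []).foldl
          (fun ls c => pvRecurse ch fuel (pvPrompt c) (i + 1)
                         (ls ++ [pvIndent i ++ "- " ++ pvPrompt c])) lines := rfl

-- a foldl whose step appends a block per element is the accumulator ++ the flatMap of the blocks
theorem foldl_step_flatMap {A B : Type} (step : List B → A → List B) (g : A → List B)
    (h : ∀ (acc : List B) (c : A), step acc c = acc ++ g c) :
    ∀ (L : List A) (acc : List B), L.foldl step acc = acc ++ L.flatMap g := by
  intro L
  induction L with
  | nil => intro acc; simp
  | cons c L ih => intro acc; simp [h, ih]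

-- A's accumulator recursion produces the concatenated subtree expansions of the children
theorem recurse_eq_sub (ch : PySem.Dict String (List (List (String × String)))) :
    ∀ (f : Nat) (p : String) (i : Nat) (acc : List String),
      pvRecurse ch (f + 1) p i acc
        = acc ++ (PySem.Dict.getD ch p []).flatMap (fun c => pvSub ch f c i) := by
  intro f
  induction f with
  | zero =>
      intro p i acc
      rw [pvRecurse_succ]
      exact foldl_step_flatMap _ _ (fun acc c => by rw [pvRecurse_zero]; rfl) _ acc
  | succ f ih =>
      intro p i acc
      rw [pvRecurse_succ]
      refine foldl_step_flatMap _ _ (fun acc c => ?_) _ acc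
      rw [ih]
      simp [pvSub]

-- B's stack loop produces the concatenated subtree expansions of its frames
theorem loop_eq_sub (ch : PySem.Dict String (List (List (String × String)))) :
    ∀ (st : List ((List (String × String)) × Nat × Nat)) (lines : List String),
      pvLoop ch st lines = lines ++ st.flatMap (fun fr => pvSub ch fr.2.2 fr.1 fr.2.1) := by
  intro st lines
  induction st, lines using pvLoop.induct ch with
  | case1 lines => simp [pvLoop]
  | case2 c ind rest lines ih =>
      rw [pvLoop, ih]
      simp [pvSub]
  | case3 c ind f rest lines ih =>
      rw [pvLoop, ih]
      simp [pvSub, List.flatMap_append, List.flatMap_map]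

-- "" ++ s = s on the string side (pvIndent 0 ++ "- " is the literal "- ")
theorem indent_zero_line (p : String) : pvIndent 0 ++ "- " ++ p = "- " ++ p := by
  have h : pvIndent 0 ++ "- " = "- " := rfl
  rw [h]

theorem build_md_tree_py_eq (nodes : List (List (String × String))) (root_prompt : String) (reverse : Bool) :
    build_md_tree_py nodes root_prompt reverse = build_md_tree_py_alt nodes root_prompt reverse := by
  cases reverse with
  | false =>
      simp only [build_md_tree_py, build_md_tree_py_alt, Bool.false_eq_true, if_false]
      rw [recurse_eq_sub, loop_eq_sub]
      simp only [List.flatMap_def, List.map_map, List.nil_append]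
      rfl
  | true =>
      simp only [build_md_tree_py, build_md_tree_py_alt, if_pos]
      rw [loop_eq_sub]
      have hgroup : ∀ t, pvRecurse (pvChildrenDict nodes root_prompt) (nodes.length + 1) (pvPrompt t) 1 ["- " ++ pvPrompt t]
          = pvSub (pvChildrenDict nodes root_prompt) (nodes.length + 1) t 0 := by
        intro t
        rw [recurse_eq_sub]
        simp [pvSub, indent_zero_line]
      have hfold :
          (PySem.Dict.getD (pvChildrenDict nodes root_prompt) root_prompt []).foldl
              (fun gs t => gs ++ [pvRecurse (pvChildrenDict nodes root_prompt) (nodes.length + 1) (pvPrompt t) 1 ["- " ++ pvPrompt t]]) []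
            = (PySem.Dict.getD (pvChildrenDict nodes root_prompt) root_prompt []).map
                (fun t => pvSub (pvChildrenDict nodes root_prompt) (nodes.length + 1) t 0) := by
        rw [PySem.List.foldl_append_singleton_eq_map]
        simp [hgroup]
      rw [hfold]
      have hflat : ∀ (gl : List (List String)) (acc : List String),
          gl.foldl (fun ls g => ls ++ g) acc = acc ++ gl.flatten := by
        intro gl
        induction gl with
        | nil => intro acc; simp
        | cons g gs ihg => intro acc; simp [ihg]
      rw [hflat]
      simp only [List.flatMap_def, List.map_map, List.map_reverse, List.nil_append]
      rfl

-- ===== VERDICT (by name: the statement is the Claim_ definition above) =====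
theorem build_md_tree_py_spec : Claim_equal_build_md_tree_py := by
  intro nodes root_prompt reverse _ _
  unfold Spec_build_md_tree_py
  exact build_md_tree_py_eq nodes root_prompt reverse
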